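-- pv_equiv track=rewrite | github.com/David-5-5/tutorial | python/algo/leecode/algo1889.py | minWastedSpace2
-- ===== SOURCE A (Python) =====
-- def minWastedSpace2(packages, boxes) -> int:
--     '''
--     The official solution
--     '''
--     from itertools import accumulate
--     from bisect import bisect_right
--     mod = 10**9 + 7
--
--     packages.sort()
--
--     # pre = list(accumulate(packages, initial=0))
--     pre = [0] + list(accumulate(packages))
--
--     # 辅助函数，通过前缀和数组，得到数组 packages[left..right] 的和
--     get = lambda left, right: pre[right+1] - pre[left]
--
--     ans = float("inf")
--     for box in boxes:
--         box.sort()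
--         # If the size of the largest package is greater than the size
--         # of the largest box, it must not be satisfied, and skip directly
--         if packages[-1] > box[-1]:
--             continue
--
--         # initial the pointer, point to the packages
--         pt = 0
--         # wasted space
--         total = 0
--
--         for cur in box:
--             if cur < packages[pt]:
--                 continue
--
--             pt_next = bisect_right(packages, cur, pt) - 1
--             total += (pt_next - pt + 1) * cur - get(pt, pt_next)
--             pt = pt_next + 1
--             if pt == len(packages):
--                 break
--
--         ans = min(ans, total)
--
--     return -1 if ans == float("inf") else ans % mod
-- ===== SOURCE B (Python) =====
-- def minWastedSpace2(packages, boxes) -> int: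
--     from bisect import bisect_left
--     mod = 10**9 + 7
--     packages.sort()
--     best = None
--     for box in boxes:
--         box.sort()
--         if packages[-1] > box[-1]:
--             continue
--         total = sum(box[bisect_left(box, p)] - p for p in packages)
--         if best is None or total < best:
--             best = total
--     return -1 if best is None else best % mod
-- ===== Notes on version B (the rewrite author's own statement) =====
-- stated objective: simpler
-- what changed: Replaced A's prefix-sum array plus two-pointer range walk over each box with a direct per-package bisect_left lookup summed over the packages, dropping the prefix sums, the pointer state and the break logic.
import Mathlib
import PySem

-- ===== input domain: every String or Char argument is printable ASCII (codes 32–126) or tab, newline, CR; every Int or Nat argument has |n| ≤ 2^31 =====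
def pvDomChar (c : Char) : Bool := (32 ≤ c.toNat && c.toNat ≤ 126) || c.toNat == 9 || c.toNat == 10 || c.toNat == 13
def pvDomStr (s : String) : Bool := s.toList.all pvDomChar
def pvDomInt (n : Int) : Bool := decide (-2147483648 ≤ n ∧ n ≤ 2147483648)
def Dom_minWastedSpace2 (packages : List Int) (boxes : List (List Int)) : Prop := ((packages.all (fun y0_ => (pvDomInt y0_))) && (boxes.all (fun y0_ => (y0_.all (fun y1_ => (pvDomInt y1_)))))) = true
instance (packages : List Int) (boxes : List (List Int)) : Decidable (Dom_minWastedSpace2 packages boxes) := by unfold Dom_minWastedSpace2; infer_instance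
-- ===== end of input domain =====

-- B replaces A's prefix-sum + two-pointer range walk per box with a per-package bisect_left
-- lookup summed over the packages (simpler); both A and B sort `packages` and each box in
-- place in Python — the equivalence proved here is about the return value (the mutations coincide).


-- ===== PORT A =====
-- pre[right+1] - pre[left]  (the lambda `get`); indices are in range wherever A evaluates it
def pvGetA (pre : List Int) (l r : Nat) : Int := pre.getD (r + 1) 0 - pre.getD l 0

-- the inner `for cur in box` loop with state (pt, total); `break` = early return of total.
-- bisect_right(packages, cur, pt): ported as `max pt (bisectRight P cur)` — exact here since
-- P is sorted and, in the branch where it is evaluated, P[pt] ≤ cur, so the result is ≥ pt.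
def pvInnerA (P pre : List Int) : List Int → Nat → Int → Int
  | [], _, total => total
  | cur :: rest, pt, total =>
    if cur < P.getD pt 0 then pvInnerA P pre rest pt total
    else
      let ptn := max pt (PySem.List.bisectRight P cur) - 1
      let total' := total + ((ptn : Int) - (pt : Int) + 1) * cur - pvGetA pre pt ptn
      if ptn + 1 = P.length then total' else pvInnerA P pre rest (ptn + 1) total'

def minWastedSpace2 (packages : List Int) (boxes : List (List Int)) : Int :=
  let P := PySem.List.sorted packages (fun x => x)
  -- pre = [0] + list(accumulate(packages))  (itertools.accumulate, ported as scanl)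
  let pre := P.scanl (· + ·) 0
  let ans := boxes.foldl (fun (ans : Option Int) box =>
    let b := PySem.List.sorted box (fun x => x)
    if PySem.List.pyGetD P (-1) 0 > PySem.List.pyGetD b (-1) 0 then ans
    else
      let total := pvInnerA P pre b 0 0
      some (match ans with | none => total | some a => min a total)) none
  match ans with
  | none => -1
  | some a => PySem.Int.mod a (10 ^ 9 + 7)

-- ===== PORT B =====
-- box[bisect_left(box, p)] - p
def pvWasteB (b : List Int) (p : Int) : Int := b.getD (PySem.List.bisectLeft b p) 0 - p

def minWastedSpace2_alt (packages : List Int) (boxes : List (List Int)) : Int :=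
  let P := PySem.List.sorted packages (fun x => x)
  let best := boxes.foldl (fun (best : Option Int) box =>
    let b := PySem.List.sorted box (fun x => x)
    if PySem.List.pyGetD P (-1) 0 > PySem.List.pyGetD b (-1) 0 then best
    else
      let total := (P.map (pvWasteB b)).sum
      match best with
      | none => some total
      | some a => if total < a then some total else some a) none
  match best with
  | none => -1
  | some a => PySem.Int.mod a (10 ^ 9 + 7)

-- ===== PRECONDITION & SPEC =====
-- Pre_ excludes exactly the inputs on which A raises IndexError: when boxes is nonempty,
-- packages must be nonempty (packages[-1]) and every box nonempty (box[-1]).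
def Pre_minWastedSpace2 (packages : List Int) (boxes : List (List Int)) : Prop :=
  boxes = [] ∨ (packages ≠ [] ∧ ∀ box ∈ boxes, box ≠ [])
instance (packages : List Int) (boxes : List (List Int)) : Decidable (Pre_minWastedSpace2 packages boxes) := by unfold Pre_minWastedSpace2; infer_instance
def pvWitness_minWastedSpace2 : List Int × List (List Int) := ([2, 3], [[4], [2, 5]])

def Spec_minWastedSpace2 (packages : List Int) (boxes : List (List Int)) (out : Int) : Prop := out = minWastedSpace2_alt packages boxes
instance (packages : List Int) (boxes : List (List Int)) (out : Int) : Decidable (Spec_minWastedSpace2 packages boxes out) := by unfold Spec_minWastedSpace2; infer_instance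

-- ===== CLAIM (what is proved, stated in full; the proofs are below) =====
def Claim_equal_minWastedSpace2 : Prop := ∀ (packages : List Int) (boxes : List (List Int)), Dom_minWastedSpace2 packages boxes → Pre_minWastedSpace2 packages boxes → Spec_minWastedSpace2 packages boxes (minWastedSpace2 packages boxes)

-- ===== LEMMAS AND PROOFS =====

-- scanl of (+) read at j is the sum of the first j elements
lemma pv_scanl_getD (P : List Int) : ∀ (j : Nat) (a : Int), j ≤ P.length →
    (P.scanl (· + ·) a).getD j 0 = a + (P.take j).sum := by
  induction P with
  | nil => intro j a hj; have : j = 0 := by simpa using hj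
           subst this; simp
  | cons p P ih =>
    intro j a hj
    cases j with
    | zero => simp
    | succ j =>
      simp only [List.scanl_cons, List.getD_cons_succ, List.take_succ_cons, List.sum_cons]
      rw [ih j (a + p) (by simpa using hj)]; ring

lemma pv_take_sum_succ (P : List Int) (m : Nat) (hm : m < P.length) :
    (P.take (m+1)).sum = (P.take m).sum + P.getD m 0 := by
  rw [List.sum_take_succ P m hm]
  simp [List.getD_eq_getElem?_getD, List.getElem?_eq_getElem hm]

-- block sum via getD over a Finset.Ico
lemma pv_sum_Ico_getD (P : List Int) (l : Nat) : ∀ (m : Nat), l ≤ m → m ≤ P.length →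
    ∑ i ∈ Finset.Ico l m, P.getD i 0 = (P.take m).sum - (P.take l).sum := by
  intro m
  induction m with
  | zero => intro h1 h2; have : l = 0 := by omega
            subst this; simp
  | succ m ih =>
    intro h1 h2
    rcases Nat.lt_or_ge l (m+1) with h | h
    · have hl : l ≤ m := by omega
      rw [Finset.sum_Ico_succ_top hl, ih hl (by omega), pv_take_sum_succ P m (by omega)]
      ring
    · have : l = m + 1 := by omega
      subst this; simp

-- list sum of a map as a Finset.range sum over getD
lemma pv_sum_map_getD (P : List Int) (f : Int → Int) :
    (P.map f).sum = ∑ i ∈ Finset.range P.length, f (P.getD i 0) := by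
  induction P with
  | nil => simp
  | cons p P ih =>
    simp only [List.map_cons, List.sum_cons, List.length_cons]
    rw [Finset.sum_range_succ' (fun i => f ((p :: P).getD i 0))]
    simp only [List.getD_cons_succ, List.getD_cons_zero]
    rw [← ih]; ring

-- B's per-package waste: the head box already fits p
lemma pv_wasteB_head (cur : Int) (rest : List Int) (p : Int)
    (hs : (cur :: rest).Pairwise (· ≤ ·)) (hp : p ≤ cur) :
    pvWasteB (cur :: rest) p = cur - p := by
  obtain ⟨hle, h2, _⟩ := PySem.List.bisectLeft_spec (cur :: rest) p hs
  have hz : PySem.List.bisectLeft (cur :: rest) p = 0 := by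
    by_contra h
    have := h2 0 (by simp) (by omega)
    simp at this; omega
  simp [pvWasteB, hz]

-- bisect_left skips a head element smaller than p
lemma pv_bisectLeft_cons (cur : Int) (rest : List Int) (p : Int)
    (hs : (cur :: rest).Pairwise (· ≤ ·)) (hp : cur < p) :
    PySem.List.bisectLeft (cur :: rest) p = PySem.List.bisectLeft rest p + 1 := by
  obtain ⟨hle, h2, h3⟩ := PySem.List.bisectLeft_spec (cur :: rest) p hs
  obtain ⟨hle', h2', h3'⟩ := PySem.List.bisectLeft_spec rest p (List.Pairwise.of_cons hs)
  set k := PySem.List.bisectLeft (cur :: rest) p with hk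
  set k' := PySem.List.bisectLeft rest p with hk'
  have hk1 : 1 ≤ k := by
    by_contra h
    have := h3 0 (by simp) (by omega)
    simp at this; omega
  obtain ⟨k0, heq⟩ : ∃ k0, k = k0 + 1 := ⟨k - 1, by omega⟩
  have hlen : k0 ≤ rest.length := by simp at hle; omega
  rcases Nat.lt_trichotomy k0 k' with h | h | h
  · have hl0 : k0 < rest.length := by omega
    have ha := h2' k0 hl0 h
    have hb := h3 (k0 + 1) (by simp; omega) (by omega)
    simp only [List.getElem_cons_succ] at hb
    omega
  · omega
  · have hl0 : k' < rest.length := by omega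
    have ha := h3' k' hl0 (le_refl _)
    have hb := h2 (k' + 1) (by simp; omega) (by omega)
    simp only [List.getElem_cons_succ] at hb
    omega

-- B's per-package waste: the head box is too small for p
lemma pv_wasteB_tail (cur : Int) (rest : List Int) (p : Int)
    (hs : (cur :: rest).Pairwise (· ≤ ·)) (hp : cur < p) :
    pvWasteB (cur :: rest) p = pvWasteB rest p := by
  rw [pvWasteB, pvWasteB, pv_bisectLeft_cons cur rest p hs hp]
  simp

-- A's inner loop is a no-op once pt = len(packages)
lemma pv_innerA_done (P pre : List Int) (hP : P.Pairwise (· ≤ ·)) (hn : 0 < P.length) :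
    ∀ (b : List Int) (total : Int), pvInnerA P pre b P.length total = total := by
  intro b
  induction b with
  | nil => intro total; rfl
  | cons cur rest ih =>
    intro total
    rw [pvInnerA]
    by_cases h : cur < P.getD P.length 0
    · simp only [if_pos h]; exact ih total
    · simp only [if_neg h]
      have hk : PySem.List.bisectRight P cur ≤ P.length := (PySem.List.bisectRight_spec P cur hP).1
      have hmax : max P.length (PySem.List.bisectRight P cur) = P.length := by omega
      rw [hmax]
      have h1 : P.length - 1 + 1 = P.length := by omega
      rw [if_pos h1]
      have : ((P.length - 1 : Nat) : Int) - (P.length : Int) + 1 = 0 := by omega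
      rw [this, pvGetA, h1]
      ring

lemma pv_getD (P : List Int) (i : Nat) (h : i < P.length) : P.getD i 0 = P[i] := by
  simp [List.getD_eq_getElem?_getD, List.getElem?_eq_getElem h]

lemma pv_getD_mono (P : List Int) (hP : P.Pairwise (· ≤ ·)) (i j : Nat)
    (hij : i ≤ j) (hj : j < P.length) : P.getD i 0 ≤ P.getD j 0 := by
  rw [pv_getD P i (by omega), pv_getD P j hj]
  rcases Nat.eq_or_lt_of_le hij with h | h
  · subst h; exact le_refl _
  · exact List.pairwise_iff_getElem.mp hP i j (by omega) hj h

-- the core invariant: A's inner loop computes total + the bisect_left waste of packages[pt:]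
lemma pv_innerA_eq (P : List Int) (hP : P.Pairwise (· ≤ ·)) (hn : 0 < P.length) :
    ∀ (b : List Int) (pt : Nat) (total : Int), b.Pairwise (· ≤ ·) → pt ≤ P.length →
    (pt < P.length → ∃ c ∈ b, P.getD (P.length - 1) 0 ≤ c) →
    pvInnerA P (P.scanl (· + ·) 0) b pt total
      = total + ∑ i ∈ Finset.Ico pt P.length, pvWasteB b (P.getD i 0) := by
  intro b
  induction b with
  | nil =>
    intro pt total hb hpt hfeas
    rcases Nat.eq_or_lt_of_le hpt with heq | hlt
    · rw [heq]; simp [pvInnerA]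
    · obtain ⟨c, hc, -⟩ := hfeas hlt; exact absurd hc (List.not_mem_nil)
  | cons cur rest ih =>
    intro pt total hb hpt hfeas
    rcases Nat.eq_or_lt_of_le hpt with heq | hlt
    · rw [heq, pv_innerA_done P _ hP hn]
      simp
    · have hlast : P.getD pt 0 ≤ P.getD (P.length - 1) 0 :=
        pv_getD_mono P hP pt (P.length - 1) (by omega) (by omega)
      rw [pvInnerA]
      by_cases hc : cur < P.getD pt 0
      · simp only [if_pos hc]
        obtain ⟨c, hcmem, hcge⟩ := hfeas hlt
        have hcur : cur < P.getD (P.length - 1) 0 := lt_of_lt_of_le hc hlast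
        have hcrest : c ∈ rest := by
          rcases List.mem_cons.mp hcmem with rfl | h
          · omega
          · exact h
        rw [ih pt total (List.Pairwise.of_cons hb) hpt (fun _ => ⟨c, hcrest, hcge⟩)]
        congr 1
        refine Finset.sum_congr rfl (fun i hi => ?_)
        rw [Finset.mem_Ico] at hi
        have hpi : P.getD pt 0 ≤ P.getD i 0 := pv_getD_mono P hP pt i hi.1 hi.2
        exact (pv_wasteB_tail cur rest _ hb (lt_of_lt_of_le hc hpi)).symm
      · simp only [if_neg hc]
        push Not at hc
        obtain ⟨hkle, hk2, hk3⟩ := PySem.List.bisectRight_spec P cur hP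
        set k := PySem.List.bisectRight P cur with hkdef
        have hptk : pt < k := by
          by_contra h
          push Not at h
          have := hk3 pt hlt h
          rw [pv_getD P pt hlt] at hc
          omega
        have hmax : max pt k = k := by omega
        rw [hmax]
        have hk1 : k - 1 + 1 = k := by omega
        rw [hk1]
        -- the contribution of this box equals the bisect_left waste of packages[pt:k]
        have hblock : total + (((k - 1 : Nat) : Int) - (pt : Int) + 1) * cur
              - pvGetA (P.scanl (· + ·) 0) pt (k - 1)
            = total + ∑ i ∈ Finset.Ico pt k, pvWasteB (cur :: rest) (P.getD i 0) := by
          have hsum : ∑ i ∈ Finset.Ico pt k, pvWasteB (cur :: rest) (P.getD i 0)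
              = ∑ i ∈ Finset.Ico pt k, (cur - P.getD i 0) := by
            refine Finset.sum_congr rfl (fun i hi => ?_)
            rw [Finset.mem_Ico] at hi
            have : P.getD i 0 ≤ cur := by
              rw [pv_getD P i (by omega)]; exact hk2 i (by omega) hi.2
            exact pv_wasteB_head cur rest _ hb this
          rw [hsum, Finset.sum_sub_distrib, Finset.sum_const, Nat.card_Ico,
              pv_sum_Ico_getD P pt k (by omega) hkle, pvGetA, hk1,
              pv_scanl_getD P k 0 hkle, pv_scanl_getD P pt 0 (by omega)]
          have hcast : ((k - pt : Nat) : Int) = (k : Int) - (pt : Int) := by omega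
          have hcast1 : ((k - 1 : Nat) : Int) = (k : Int) - 1 := by omega
          simp only [nsmul_eq_mul]
          rw [hcast, hcast1]
          ring
        by_cases hkn : k = P.length
        · rw [if_pos hkn, hblock, hkn]
        · rw [if_neg hkn]
          have hklt : k < P.length := by omega
          have hcurk : cur < P.getD k 0 := by
            rw [pv_getD P k hklt]; exact hk3 k hklt (le_refl _)
          have hfeas' : ∃ c ∈ rest, P.getD (P.length - 1) 0 ≤ c := by
            obtain ⟨c, hcmem, hcge⟩ := hfeas hlt
            have : cur < P.getD (P.length - 1) 0 :=
              lt_of_lt_of_le hcurk (pv_getD_mono P hP k (P.length - 1) (by omega) (by omega))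
            rcases List.mem_cons.mp hcmem with rfl | h
            · omega
            · exact ⟨c, h, hcge⟩
          rw [ih k _ (List.Pairwise.of_cons hb) (by omega) (fun _ => hfeas'), hblock]
          rw [← Finset.sum_Ico_consecutive _ (show pt ≤ k by omega) (show k ≤ P.length by omega)]
          have : ∑ i ∈ Finset.Ico k P.length, pvWasteB rest (P.getD i 0)
              = ∑ i ∈ Finset.Ico k P.length, pvWasteB (cur :: rest) (P.getD i 0) := by
            refine Finset.sum_congr rfl (fun i hi => ?_)
            rw [Finset.mem_Ico] at hi
            have : cur < P.getD i 0 := lt_of_lt_of_le hcurk (pv_getD_mono P hP k i hi.1 hi.2)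
            exact (pv_wasteB_tail cur rest _ hb this).symm
          rw [this]
          ring


-- per-box: A's accumulator step equals B's accumulator step
lemma pv_step_eq (P : List Int) (hP : P.Pairwise (· ≤ ·)) (hPne : P ≠ [])
    (box : List Int) (hbne0 : box ≠ []) (ans : Option Int) :
    (if PySem.List.pyGetD P (-1) 0 > PySem.List.pyGetD (PySem.List.sorted box (fun x => x)) (-1) 0
     then ans
     else some (match ans with
       | none => pvInnerA P (P.scanl (· + ·) 0) (PySem.List.sorted box (fun x => x)) 0 0
       | some a => min a (pvInnerA P (P.scanl (· + ·) 0) (PySem.List.sorted box (fun x => x)) 0 0)))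
    = (if PySem.List.pyGetD P (-1) 0 > PySem.List.pyGetD (PySem.List.sorted box (fun x => x)) (-1) 0
       then ans
       else match ans with
       | none => some ((P.map (pvWasteB (PySem.List.sorted box (fun x => x)))).sum)
       | some a =>
         if (P.map (pvWasteB (PySem.List.sorted box (fun x => x)))).sum < a
         then some ((P.map (pvWasteB (PySem.List.sorted box (fun x => x)))).sum)
         else some a) := by
  have hbP : (PySem.List.sorted box (fun x => x)).Pairwise (· ≤ ·) :=
    PySem.List.sorted_pairwise box (fun x => x)
  have hbne : PySem.List.sorted box (fun x => x) ≠ [] := by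
    rw [Ne, PySem.List.sorted_eq_nil_iff]; exact hbne0
  by_cases hg : PySem.List.pyGetD P (-1) 0 > PySem.List.pyGetD (PySem.List.sorted box (fun x => x)) (-1) 0
  · rw [if_pos hg, if_pos hg]
  · rw [if_neg hg, if_neg hg]
    have hn : 0 < P.length := List.length_pos_of_ne_nil hPne
    have hfe : 0 < P.length → ∃ c ∈ PySem.List.sorted box (fun x => x),
        P.getD (P.length - 1) 0 ≤ c := by
      intro _
      refine ⟨(PySem.List.sorted box (fun x => x)).getLast hbne, List.getLast_mem hbne, ?_⟩
      rw [PySem.List.pyGetD_neg_one P 0 hPne, PySem.List.pyGetD_neg_one _ 0 hbne] at hg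
      rw [pv_getD P (P.length - 1) (by omega), ← List.getLast_eq_getElem hPne]
      omega
    have htot := pv_innerA_eq P hP hn (PySem.List.sorted box (fun x => x)) 0 0 hbP (by omega) hfe
    have hmap : pvInnerA P (P.scanl (· + ·) 0) (PySem.List.sorted box (fun x => x)) 0 0
        = (P.map (pvWasteB (PySem.List.sorted box (fun x => x)))).sum := by
      rw [htot, pv_sum_map_getD, Finset.range_eq_Ico]
      ring
    rw [hmap]
    cases ans with
    | none => rfl
    | some a =>
      simp only [min_def]
      split_ifs <;> first | rfl | (congr 1; omega)

-- ===== VERDICT (by name: the statement is the Claim_ definition above) =====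
theorem minWastedSpace2_spec : Claim_equal_minWastedSpace2 := by
  intro packages boxes hdom hpre
  unfold Spec_minWastedSpace2 minWastedSpace2 minWastedSpace2_alt
  simp only []
  rcases hpre with hb | ⟨hpne, hboxes⟩
  · subst hb; rfl
  · have hP := PySem.List.sorted_pairwise packages (fun x => x)
    have hPne : PySem.List.sorted packages (fun x => x) ≠ [] := by
      rw [Ne, PySem.List.sorted_eq_nil_iff]; exact hpne
    rw [PySem.List.foldl_congr_mem boxes _ _ none
      (fun acc x hx => pv_step_eq (PySem.List.sorted packages (fun x => x)) hP hPne x (hboxes x hx) acc)]
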